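-- pv_equiv track=rewrite | github.com/glbter/kpi-computing | comp_discrete_math/sets.py | BitUnion
-- ===== SOURCE A (Python) =====
-- def BitRepr(Set, univ):
--     res = []
--     for elem in univ:
--         if elem in Set:
--             res.append(1)
--         else:
--             res.append(0)
--     return res
--
-- def BitUnion (arr1, arr2, univ):
--     Set = BitRepr(arr1, univ)
--     Set2 = BitRepr(arr2, univ)
--     res = []
--     for i in range(0, len(univ)):
--         if (Set[i] == 1) or (Set2[i] == 1):
--             res.append(1)
--         else:
--             res.append(0)
--     return res
-- ===== SOURCE B (Python) =====
-- def BitUnion(arr1, arr2, univ):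
--     # one pass over univ; no intermediate bitvectors
--     return [1 if (elem in arr1 or elem in arr2) else 0 for elem in univ]
-- ===== Notes on version B (the rewrite author's own statement) =====
-- stated objective: simpler
-- what changed: Drops the BitRepr helper and both intermediate bitvectors: instead of two table-building passes plus an index-driven combine pass, B is a single comprehension over univ emitting 1 iff the element is in arr1 or arr2.
import Mathlib
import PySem

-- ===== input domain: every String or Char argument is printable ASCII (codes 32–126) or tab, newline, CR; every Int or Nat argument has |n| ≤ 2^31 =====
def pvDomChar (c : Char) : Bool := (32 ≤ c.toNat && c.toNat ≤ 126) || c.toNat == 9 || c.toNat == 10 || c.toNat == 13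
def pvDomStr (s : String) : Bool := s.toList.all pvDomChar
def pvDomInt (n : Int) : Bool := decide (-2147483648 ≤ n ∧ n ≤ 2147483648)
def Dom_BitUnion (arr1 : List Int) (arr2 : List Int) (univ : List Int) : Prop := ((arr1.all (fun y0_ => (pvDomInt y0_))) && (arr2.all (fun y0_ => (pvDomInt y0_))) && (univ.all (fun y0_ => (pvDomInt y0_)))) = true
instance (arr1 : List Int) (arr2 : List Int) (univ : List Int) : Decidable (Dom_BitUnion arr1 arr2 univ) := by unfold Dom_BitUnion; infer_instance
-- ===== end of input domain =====

-- B replaces A's three passes (two BitRepr tables plus an index-driven combine loop)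
-- by a single pass over univ testing membership directly; objective: simpler.

-- ===== PORT A =====
-- literal port of BitRepr: append 1/0 per element of univ
def BitRepr (S : List Int) (univ : List Int) : List Int :=
  univ.foldl (fun res elem => if S.contains elem then res ++ [(1 : Int)] else res ++ [0]) []

-- literal port of A: build both bitvectors, then combine by index over range(0, len(univ));
-- Set[i] / Set2[i] ported as pyGetD (the index is always in range: both tables have length univ.length)
def BitUnion (arr1 : List Int) (arr2 : List Int) (univ : List Int) : List Int :=
  let S := BitRepr arr1 univ
  let S2 := BitRepr arr2 univ
  (PySem.List.pyRange 0 (univ.length : Int) 1).foldl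
    (fun res i =>
      if PySem.List.pyGetD S i 0 == 1 || PySem.List.pyGetD S2 i 0 == 1 then res ++ [(1 : Int)]
      else res ++ [0]) []

-- ===== PORT B =====
def BitUnion_alt (arr1 : List Int) (arr2 : List Int) (univ : List Int) : List Int :=
  univ.map (fun elem => if arr1.contains elem || arr2.contains elem then (1 : Int) else 0)

-- ===== PRECONDITION & SPEC =====
def Spec_BitUnion (arr1 : List Int) (arr2 : List Int) (univ : List Int) (out : List Int) : Prop := out = BitUnion_alt arr1 arr2 univ
instance (arr1 : List Int) (arr2 : List Int) (univ : List Int) (out : List Int) : Decidable (Spec_BitUnion arr1 arr2 univ out) := by unfold Spec_BitUnion; infer_instance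

-- ===== CLAIM (what is proved, stated in full; the proofs are below) =====
def Claim_equal_BitUnion : Prop := ∀ (arr1 : List Int) (arr2 : List Int) (univ : List Int), Dom_BitUnion arr1 arr2 univ → Spec_BitUnion arr1 arr2 univ (BitUnion arr1 arr2 univ)

-- ===== LEMMAS AND PROOFS =====

-- a 0/1-appending loop is a map with the bit pulled inside the append
theorem foldl_bit (l : List Int) (p : Int → Bool) (acc : List Int) :
    l.foldl (fun r e => if p e then r ++ [(1 : Int)] else r ++ [0]) acc
      = acc ++ l.map (fun e => if p e then (1 : Int) else 0) := by
  induction l generalizing acc with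
  | nil => simp
  | cons x xs ih => by_cases h : p x <;> simp [h, ih]

theorem bitRepr_eq_map (S univ : List Int) :
    BitRepr S univ = univ.map (fun e => if S.contains e then (1 : Int) else 0) := by
  unfold BitRepr
  simpa using foldl_bit univ (fun e => S.contains e) []

theorem BitUnion_spec : Claim_equal_BitUnion := by
  intro arr1 arr2 univ _
  unfold Spec_BitUnion BitUnion
  dsimp only
  rw [bitRepr_eq_map, bitRepr_eq_map]
  refine Eq.trans (PySem.List.foldl_congr_mem _ _
    (fun res i =>
      if ((if arr1.contains (PySem.List.pyGetD univ i 0) then (1:Int) else 0) == 1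
          || (if arr2.contains (PySem.List.pyGetD univ i 0) then (1:Int) else 0) == 1)
      then res ++ [(1:Int)] else res ++ [0]) _ ?_) ?_
  · intro acc i hi
    rw [PySem.List.mem_pyRange_one] at hi
    dsimp only
    rw [PySem.List.pyGetD_eq_getElem _ _ hi.1 (by simpa using hi.2),
        PySem.List.pyGetD_eq_getElem _ _ hi.1 (by simpa using hi.2),
        PySem.List.pyGetD_eq_getElem _ _ hi.1 (by simpa using hi.2)]
    simp
  · refine Eq.trans (PySem.List.foldl_pyRange_zero_pyGetD' univ 0
      (fun res e =>
        if ((if arr1.contains e then (1:Int) else 0) == 1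
            || (if arr2.contains e then (1:Int) else 0) == 1)
        then res ++ [(1:Int)] else res ++ [0]) []) ?_
    unfold BitUnion_alt
    rw [foldl_bit univ
      (fun e => ((if arr1.contains e then (1:Int) else 0) == 1
            || (if arr2.contains e then (1:Int) else 0) == 1)) []]
    simp only [List.nil_append]
    apply List.map_congr_left
    intro e _
    simp
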